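-- pv_equiv track=rewrite | github.com/rumman52/Shuddho | services/normalizer/shuddho_normalizer/normalizer.py | _normalize_newlines
-- ===== SOURCE A (Python) =====
-- def _normalize_newlines(items: list[tuple[str, int]]) -> list[tuple[str, int]]:
--     normalized: list[tuple[str, int]] = []
--     position = 0
--     while position < len(items):
--         character, index = items[position]
--         if character == "\r":
--             normalized.append(("\n", index))
--             if position + 1 < len(items) and items[position + 1][0] == "\n":
--                 position += 2
--                 continue
--         else:
--             normalized.append((character, index))
--         position += 1
--     return normalized
-- ===== SOURCE B (Python) =====
-- def _normalize_newlines(items: list[tuple[str, int]]) -> list[tuple[str, int]]: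
--     normalized: list[tuple[str, int]] = []
--     prev_was_cr = False
--     for character, index in items:
--         if character == "\r":
--             normalized.append(("\n", index))
--             prev_was_cr = True
--         elif character == "\n" and prev_was_cr:
--             prev_was_cr = False
--         else:
--             normalized.append((character, index))
--             prev_was_cr = False
--     return normalized
-- ===== Notes on version B (the rewrite author's own statement) =====
-- stated objective: idiomatic
-- what changed: Replaced the manual while-index loop with forward lookahead and position skipping by a single for-loop over items maintaining one boolean lookbehind flag prev_was_cr.
import Mathlib
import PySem

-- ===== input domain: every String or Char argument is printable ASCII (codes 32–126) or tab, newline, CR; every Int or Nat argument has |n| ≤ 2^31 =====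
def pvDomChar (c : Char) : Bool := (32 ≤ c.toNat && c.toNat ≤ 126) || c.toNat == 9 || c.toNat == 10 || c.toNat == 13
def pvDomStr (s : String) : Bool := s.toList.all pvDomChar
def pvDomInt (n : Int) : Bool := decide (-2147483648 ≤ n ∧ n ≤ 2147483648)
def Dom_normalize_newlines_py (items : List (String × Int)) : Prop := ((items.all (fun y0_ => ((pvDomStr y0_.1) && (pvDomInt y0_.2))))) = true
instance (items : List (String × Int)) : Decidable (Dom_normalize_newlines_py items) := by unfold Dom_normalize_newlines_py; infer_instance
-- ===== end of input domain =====

-- B replaces A's while-index loop with lookahead/skip by a single pass keeping a boolean lookbehind flag (more idiomatic).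


-- ===== PORT A =====
-- A's while-loop over positions, with lookahead items[position+1] and the position += 2 skip,
-- transliterated as the corresponding recursion on the suffix of the list.
def goA : List (String × Int) → List (String × Int)
  | [] => []
  | [(c, i)] => if c = "\r" then [("\n", i)] else [(c, i)]
  | (c, i) :: (c2, i2) :: rest =>
      if c = "\r" then
        ("\n", i) :: (if c2 = "\n" then goA rest else goA ((c2, i2) :: rest))
      else
        (c, i) :: goA ((c2, i2) :: rest)

def normalize_newlines_py (items : List (String × Int)) : List (String × Int) := goA items

-- ===== PORT B =====
-- one step of B's for-loop: state = (prev_was_cr, normalized)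
def stepB (st : Bool × List (String × Int)) (p : String × Int) : Bool × List (String × Int) :=
  if p.1 = "\r" then (true, st.2 ++ [("\n", p.2)])
  else if p.1 = "\n" ∧ st.1 = true then (false, st.2)
  else (false, st.2 ++ [p])

def normalize_newlines_py_alt (items : List (String × Int)) : List (String × Int) :=
  (items.foldl stepB (false, [])).2

-- ===== PRECONDITION & SPEC =====
def Spec_normalize_newlines_py (items : List (String × Int)) (out : List (String × Int)) : Prop := out = normalize_newlines_py_alt items
instance (items : List (String × Int)) (out : List (String × Int)) : Decidable (Spec_normalize_newlines_py items out) := by unfold Spec_normalize_newlines_py; infer_instance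

-- ===== CLAIM (what is proved, stated in full; the proofs are below) =====
def Claim_equal_normalize_newlines_py : Prop := ∀ (items : List (String × Int)), Dom_normalize_newlines_py items → Spec_normalize_newlines_py items (normalize_newlines_py items)

-- ===== LEMMAS AND PROOFS =====

-- what B computes on xs when the flag is set: a leading "\n" is skipped, otherwise like goA
def gTrue (xs : List (String × Int)) : List (String × Int) :=
  match xs with
  | (c, _) :: rest => if c = "\n" then goA rest else goA xs
  | [] => []

theorem goA_cr (i : Int) (rest : List (String × Int)) :
    goA (("\r", i) :: rest) = ("\n", i) :: gTrue rest := by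
  match rest with
  | [] => simp [goA, gTrue]
  | (c2, i2) :: rest2 =>
      simp only [goA, gTrue, if_pos rfl]
      by_cases h : c2 = "\n" <;> simp [h]

theorem goA_other (c : String) (i : Int) (rest : List (String × Int)) (hc : c ≠ "\r") :
    goA ((c, i) :: rest) = (c, i) :: goA rest := by
  match rest with
  | [] => simp [goA, hc]
  | (c2, i2) :: rest2 => simp [goA, hc]

theorem foldB_inv (xs : List (String × Int)) (flag : Bool) (acc : List (String × Int)) :
    (List.foldl stepB (flag, acc) xs).2 = acc ++ (if flag then gTrue xs else goA xs) := by
  induction xs generalizing flag acc with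
  | nil => cases flag <;> simp [goA, gTrue]
  | cons p rest ih =>
      obtain ⟨c, i⟩ := p
      by_cases hcr : c = "\r"
      · subst hcr
        simp only [List.foldl_cons, stepB, ih]
        cases flag
        · simp [goA_cr]
        · have h1 : gTrue (("\r", i) :: rest) = ("\n", i) :: gTrue rest := by
            rw [show gTrue (("\r", i) :: rest) = goA (("\r", i) :: rest) from rfl, goA_cr]
          simp [h1]
      · by_cases hnl : c = "\n"
        · subst hnl
          cases flag
          · simp only [List.foldl_cons, stepB, if_neg (by decide : ¬ ("\n" : String) = "\r")]
            simp only [ih]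
            simp [goA_other _ _ _ (by decide : ("\n" : String) ≠ "\r")]
          · simp only [List.foldl_cons, stepB, if_neg (by decide : ¬ ("\n" : String) = "\r")]
            simp only [ih]
            simp only [if_pos rfl, and_true, if_pos (True.intro)]
            have : gTrue (("\n", i) :: rest) = goA rest := by
              cases rest <;> rfl
            simp [this]
        · have hs : stepB (flag, acc) (c, i) = (false, acc ++ [(c, i)]) := by
            simp [stepB, hcr, hnl]
          simp only [List.foldl_cons, hs, ih]
          cases flag
          · simp [goA_other c i rest hcr]
          · have : gTrue ((c, i) :: rest) = goA ((c, i) :: rest) := by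
              simp [gTrue, hnl]
            simp [this, goA_other c i rest hcr]

-- ===== VERDICT (by name: the statement is the Claim_ definition above) =====
theorem normalize_newlines_py_spec : Claim_equal_normalize_newlines_py := by
  intro items _
  unfold Spec_normalize_newlines_py normalize_newlines_py normalize_newlines_py_alt
  simp [foldB_inv]
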